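-- pv_equiv track=rewrite | github.com/timusgg/testprojdqnsa | Project (2)/functions.py | getFSIndexes
-- ===== SOURCE A (Python) =====
-- def getFSIndexes(link):
--     x = 0
--     freeslots = []
--     slotsBlock = []
--     for slot in range(len(link)):
--         if link[slot] == 0 :
--             x += 1
--             slotsBlock.append(slot)
--         else :
--             if x > 0:
--                 freeslots.append(slotsBlock)
--                 slotsBlock = []
--             x = 0
--     if x > 0:
--         freeslots.append(slotsBlock)
--
--
--     return freeslots
-- ===== SOURCE B (Python) =====
-- def getFSIndexes(link):
--     freeslots = []
--     i = 0
--     n = len(link)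
--     while i < n:
--         if link[i] == 0:
--             j = i
--             while j < n and link[j] == 0:
--                 j += 1
--             freeslots.append(list(range(i, j)))
--             i = j
--         else:
--             i += 1
--     return freeslots
-- ===== Notes on version B (the rewrite author's own statement) =====
-- stated objective: alternative
-- what changed: Replaced A's per-index flag/counter state machine (increment x, flush slotsBlock on each nonzero, plus a trailing flush) by a two-pointer scan that, at each zero, advances an inner pointer to the end of the run and emits range(i, j) directly, with no block-building state.
import Mathlib
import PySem

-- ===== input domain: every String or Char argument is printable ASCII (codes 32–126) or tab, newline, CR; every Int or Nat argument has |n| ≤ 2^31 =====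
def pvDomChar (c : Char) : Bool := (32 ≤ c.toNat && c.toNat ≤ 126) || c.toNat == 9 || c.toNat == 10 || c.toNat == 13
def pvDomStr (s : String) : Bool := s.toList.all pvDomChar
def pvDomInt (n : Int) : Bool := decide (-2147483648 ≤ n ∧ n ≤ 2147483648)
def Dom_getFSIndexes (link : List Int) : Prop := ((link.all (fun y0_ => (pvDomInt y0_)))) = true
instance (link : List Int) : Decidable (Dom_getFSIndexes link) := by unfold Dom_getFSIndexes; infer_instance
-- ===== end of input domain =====

-- B replaces A's flag/counter flush state machine by a two-pointer run scan; return value only, no mutation.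

-- ===== PORT A =====
-- loop body of A: state is (x, freeslots, slotsBlock)
def pvStepA (link : List Int) (st : Int × List (List Int) × List Int) (slot : Int) :
    Int × List (List Int) × List Int :=
  match st with
  | (x, freeslots, slotsBlock) =>
    if PySem.List.pyGetD link slot 1 = 0 then
      (x + 1, freeslots, slotsBlock ++ [slot])
    else
      if x > 0 then (0, freeslots ++ [slotsBlock], [])
      else (0, freeslots, slotsBlock)

def getFSIndexes (link : List Int) : List (List Int) :=
  match (PySem.List.pyRange 0 link.length 1).foldl (pvStepA link) (0, [], []) with
  | (x, freeslots, slotsBlock) => if x > 0 then freeslots ++ [slotsBlock] else freeslots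

-- ===== PORT B =====
-- inner while of B (advance j past the run of zeros); fuel ≥ length − j makes it total, link.length always suffices
def pvZrun (link : List Int) : Nat → Nat → Nat
  | 0, j => j
  | fuel + 1, j =>
    if j < link.length then
      if link.getD j 1 = 0 then pvZrun link fuel (j + 1) else j
    else j

-- outer while of B; fuel ≥ length − i makes it total, link.length always suffices
def pvBLoop (link : List Int) : Nat → Nat → List (List Int)
  | 0, _ => []
  | fuel + 1, i =>
    if i < link.length then
      if link.getD i 1 = 0 then
        PySem.List.pyRange (i : Int) (pvZrun link link.length i : Int) 1
          :: pvBLoop link fuel (pvZrun link link.length i)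
      else pvBLoop link fuel (i + 1)
    else []

def getFSIndexes_alt (link : List Int) : List (List Int) := pvBLoop link link.length 0

-- ===== PRECONDITION & SPEC =====
def Spec_getFSIndexes (link : List Int) (out : List (List Int)) : Prop := out = getFSIndexes_alt link
instance (link : List Int) (out : List (List Int)) : Decidable (Spec_getFSIndexes link out) := by unfold Spec_getFSIndexes; infer_instance

-- ===== CLAIM (what is proved, stated in full; the proofs are below) =====
def Claim_equal_getFSIndexes : Prop := ∀ (link : List Int), Dom_getFSIndexes link → Spec_getFSIndexes link (getFSIndexes link)

-- ===== LEMMAS AND PROOFS =====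

-- A's final flush, as a function of the fold state (used only to state pvMain)
def pvPost (st : Int × List (List Int) × List Int) : List (List Int) :=
  if st.1 > 0 then st.2.1 ++ [st.2.2] else st.2.1

theorem le_pvZrun (link : List Int) : ∀ (fuel j : Nat), j ≤ pvZrun link fuel j := by
  intro fuel
  induction fuel with
  | zero => intro j; simp [pvZrun]
  | succ fuel ih =>
    intro j
    simp only [pvZrun]
    split
    · split
      · exact le_trans (Nat.le_succ j) (ih (j + 1))
      · exact le_rfl
    · exact le_rfl

theorem pvZrun_stop (link : List Int) (fuel j : Nat)
    (h : ¬ j < link.length ∨ ¬ link.getD j 1 = 0) : pvZrun link fuel j = j := by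
  cases fuel with
  | zero => rfl
  | succ fuel =>
    rcases h with h | h
    · simp [pvZrun, h]
    · by_cases hj : j < link.length
      · have h' : ¬ link[j]?.getD 1 = 0 := by simpa [List.getD] using h
        have h'' : ¬ link[j] = 0 := by rwa [List.getElem?_eq_getElem hj, Option.getD_some] at h'
        simp [pvZrun, hj, List.getD, h'']
      · simp [pvZrun, hj]

theorem lt_pvZrun (link : List Int) : ∀ (fuel j : Nat), link.length - j ≤ fuel →
    j < link.length → link.getD j 1 = 0 → j < pvZrun link fuel j := by
  intro fuel
  induction fuel with
  | zero => intro j hk hj _; omega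
  | succ fuel _ =>
    intro j _ hj h0
    simp only [pvZrun, hj, if_true, h0]
    exact lt_of_lt_of_le (Nat.lt_succ_self j) (le_pvZrun link fuel (j + 1))

theorem pvZrun_congr (link : List Int) : ∀ (k k' j : Nat),
    link.length - j ≤ k → link.length - j ≤ k' → pvZrun link k j = pvZrun link k' j := by
  intro k
  induction k with
  | zero =>
    intro k' j hk hk'
    have hj : ¬ j < link.length := by omega
    rw [pvZrun_stop link 0 j (Or.inl hj), pvZrun_stop link k' j (Or.inl hj)]
  | succ k ih =>
    intro k' j hk hk'
    by_cases hj : j < link.length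
    · cases k' with
      | zero => omega
      | succ k' =>
        by_cases h0 : link.getD j 1 = 0
        · simp only [pvZrun, hj, if_true, h0]
          exact ih k' (j + 1) (by omega) (by omega)
        · simp only [pvZrun, hj, if_true, h0, if_false]
    · rw [pvZrun_stop link (k + 1) j (Or.inl hj), pvZrun_stop link k' j (Or.inl hj)]

theorem pvBLoop_stop (link : List Int) (fuel i : Nat) (h : ¬ i < link.length) :
    pvBLoop link fuel i = [] := by
  cases fuel with
  | zero => rfl
  | succ fuel => simp [pvBLoop, h]

theorem pvBLoop_congr (link : List Int) : ∀ (k k' i : Nat),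
    link.length - i ≤ k → link.length - i ≤ k' → pvBLoop link k i = pvBLoop link k' i := by
  intro k
  induction k with
  | zero =>
    intro k' i hk hk'
    have hi : ¬ i < link.length := by omega
    rw [pvBLoop_stop link 0 i hi, pvBLoop_stop link k' i hi]
  | succ k ih =>
    intro k' i hk hk'
    by_cases hi : i < link.length
    · cases k' with
      | zero => omega
      | succ k' =>
        by_cases h0 : link.getD i 1 = 0
        · have hz : i < pvZrun link link.length i := lt_pvZrun link link.length i (by omega) hi h0
          simp only [pvBLoop, hi, if_true, h0]
          rw [ih k' (pvZrun link link.length i) (by omega) (by omega)]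
        · simp only [pvBLoop, hi, if_true, h0, if_false]
          exact ih k' (i + 1) (by omega) (by omega)
    · rw [pvBLoop_stop link (k + 1) i hi, pvBLoop_stop link k' i hi]

-- one-step unfolding of pvBLoop at full fuel, in the zero and nonzero cases
theorem pvBLoop_unfold_zero (link : List Int) (i : Nat) (hi : i < link.length)
    (h0 : link.getD i 1 = 0) :
    pvBLoop link link.length i
      = PySem.List.pyRange (i : Int) (pvZrun link link.length i : Int) 1
          :: pvBLoop link link.length (pvZrun link link.length i) := by
  obtain ⟨m, hm⟩ : ∃ m, link.length = m + 1 := ⟨link.length - 1, by omega⟩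
  have hz : i < pvZrun link link.length i := lt_pvZrun link link.length i (by omega) hi h0
  conv_lhs => rw [hm]
  simp only [pvBLoop, hi, if_true, h0]
  rw [pvBLoop_congr link m link.length (pvZrun link link.length i) (by omega) (by omega)]

theorem pvBLoop_unfold_pos (link : List Int) (i : Nat) (hi : i < link.length)
    (h0 : ¬ link.getD i 1 = 0) :
    pvBLoop link link.length i = pvBLoop link link.length (i + 1) := by
  obtain ⟨m, hm⟩ : ∃ m, link.length = m + 1 := ⟨link.length - 1, by omega⟩
  conv_lhs => rw [hm]
  simp only [pvBLoop, hi, if_true, h0, if_false]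
  exact pvBLoop_congr link m link.length (i + 1) (by omega) (by omega)

theorem pvZrun_unfold_zero (link : List Int) (i : Nat) (hi : i < link.length)
    (h0 : link.getD i 1 = 0) :
    pvZrun link link.length i = pvZrun link link.length (i + 1) := by
  obtain ⟨m, hm⟩ : ∃ m, link.length = m + 1 := ⟨link.length - 1, by omega⟩
  conv_lhs => rw [hm]
  simp only [pvZrun, hi, if_true, h0]
  exact pvZrun_congr link m link.length (i + 1) (by omega) (by omega)

-- finishing A's fold from index i with an empty current block yields pvBLoop i; with a
-- pending block sb (x > 0) it yields sb extended by the remaining zero run, then pvBLoop.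
theorem pvMain (link : List Int) : ∀ (k i : Nat), link.length - i ≤ k →
    (∀ fs : List (List Int),
      pvPost ((PySem.List.pyRange (i : Int) (link.length : Int) 1).foldl (pvStepA link) (0, fs, []))
      = fs ++ pvBLoop link link.length i)
    ∧ (∀ (fs : List (List Int)) (sb : List Int) (x : Int), 0 < x →
      pvPost ((PySem.List.pyRange (i : Int) (link.length : Int) 1).foldl (pvStepA link) (x, fs, sb))
      = fs ++ ((sb ++ PySem.List.pyRange (i : Int) (pvZrun link link.length i : Int) 1)
                 :: pvBLoop link link.length (pvZrun link link.length i))) := by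
  intro k
  induction k with
  | zero =>
    intro i hk
    have hi : ¬ i < link.length := by omega
    have hz : pvZrun link link.length i = i := pvZrun_stop link link.length i (Or.inl hi)
    have hr : PySem.List.pyRange (i : Int) (link.length : Int) 1 = [] :=
      PySem.List.pyRange_one_eq_nil (by exact_mod_cast (by omega : link.length ≤ i))
    have hb : pvBLoop link link.length i = [] := pvBLoop_stop link link.length i hi
    constructor
    · intro fs; simp [hr, hb, pvPost]
    · intro fs sb x hx
      simp [hr, hz, hb, pvPost, PySem.List.pyRange_one_eq_nil (le_refl (i : Int)), hx]
  | succ k ih =>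
    intro i hk
    by_cases hi : i < link.length
    · have hcons : PySem.List.pyRange (i : Int) (link.length : Int) 1
          = (i : Int) :: PySem.List.pyRange ((i : Int) + 1) (link.length : Int) 1 :=
        PySem.List.pyRange_one_cons (by exact_mod_cast hi)
      have hcast : ((i : Int) + 1) = ((i + 1 : Nat) : Int) := by push_cast; ring
      have ihs := ih (i + 1) (by omega)
      by_cases h0 : link.getD i 1 = 0
      · -- link[i] == 0
        have h0e : link[i]?.getD 1 = 0 := by simpa [List.getD] using h0
        have hstep0 : ∀ (x : Int) fs sb, pvStepA link (x, fs, sb) (i : Int) = (x + 1, fs, sb ++ [(i : Int)]) := by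
          intro x fs sb
          simp [pvStepA, PySem.List.pyGetD_natCast, List.getD, h0e]
        have hz : pvZrun link link.length i = pvZrun link link.length (i + 1) :=
          pvZrun_unfold_zero link i hi h0
        have hlt : i < pvZrun link link.length i := lt_pvZrun link link.length i (by omega) hi h0
        have hrun : PySem.List.pyRange (i : Int) (pvZrun link link.length i : Int) 1
            = (i : Int) :: PySem.List.pyRange ((i : Int) + 1) (pvZrun link link.length i : Int) 1 :=
          PySem.List.pyRange_one_cons (by exact_mod_cast hlt)
        have hb := pvBLoop_unfold_zero link i hi h0
        constructor
        · intro fs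
          rw [hcons]; simp only [List.foldl_cons, hstep0]
          have := ihs.2 fs ([] ++ [(i : Int)]) (0 + 1) (by omega)
          rw [← hcast] at this
          rw [this, hb, hrun, hz, hcast]
          simp
        · intro fs sb x hx
          rw [hcons]; simp only [List.foldl_cons, hstep0]
          have := ihs.2 fs (sb ++ [(i : Int)]) (x + 1) (by omega)
          rw [← hcast] at this
          rw [this, hrun, hz, hcast]
          simp
      · -- link[i] != 0
        have h0e : ¬ link[i]?.getD 1 = 0 := by simpa [List.getD] using h0
        have hz : pvZrun link link.length i = i := pvZrun_stop link link.length i (Or.inr h0)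
        have hb : pvBLoop link link.length i = pvBLoop link link.length (i + 1) :=
          pvBLoop_unfold_pos link i hi h0
        constructor
        · intro fs
          rw [hcons]; simp only [List.foldl_cons]
          have hstep : pvStepA link ((0 : Int), fs, ([] : List Int)) (i : Int) = (0, fs, []) := by
            simp [pvStepA, PySem.List.pyGetD_natCast, List.getD, h0e]
          rw [hstep, hcast, ihs.1 fs, hb]
        · intro fs sb x hx
          rw [hcons]; simp only [List.foldl_cons]
          have hstep : pvStepA link (x, fs, sb) (i : Int) = (0, fs ++ [sb], []) := by
            simp [pvStepA, PySem.List.pyGetD_natCast, List.getD, h0e, hx]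
          rw [hstep, hcast, ihs.1 (fs ++ [sb]), hz, hb]
          simp [PySem.List.pyRange_one_eq_nil (le_refl (i : Int))]
    · have hz : pvZrun link link.length i = i := pvZrun_stop link link.length i (Or.inl hi)
      have hr : PySem.List.pyRange (i : Int) (link.length : Int) 1 = [] :=
        PySem.List.pyRange_one_eq_nil (by exact_mod_cast (by omega : link.length ≤ i))
      have hb : pvBLoop link link.length i = [] := pvBLoop_stop link link.length i hi
      constructor
      · intro fs; simp [hr, hb, pvPost]
      · intro fs sb x hx
        simp [hr, hz, hb, pvPost, PySem.List.pyRange_one_eq_nil (le_refl (i : Int)), hx]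

-- ===== VERDICT (by name: the statement is the Claim_ definition above) =====
theorem getFSIndexes_spec : Claim_equal_getFSIndexes := by
  intro link _
  unfold Spec_getFSIndexes getFSIndexes getFSIndexes_alt
  have h := (pvMain link link.length 0 (by omega)).1 []
  rcases he : (PySem.List.pyRange 0 (link.length : Int) 1).foldl (pvStepA link) (0, [], []) with ⟨x, fr, sb⟩
  have hc : ((0 : Nat) : Int) = (0 : Int) := by norm_num
  rw [hc, he] at h
  simpa [pvPost] using h
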